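-- pv_equiv track=rewrite | github.com/zlovantuzu/mipt_python | HT4/matrix_tools.py | mult_matrix_vector
-- ===== SOURCE A (Python) =====
-- def mult_matrix_vector(matrix, vector):
--     result = []
--     for row in matrix:
--         row_result = 0
--         for i in range(len(vector)):
--             row_result += row[i] * vector[i]
--         result.append(row_result)
--     return result
-- ===== SOURCE B (Python) =====
-- def mult_matrix_vector(matrix, vector):
--     # Column-oriented accumulation: walk the vector once, updating the whole
--     # result vector per column instead of one row dot product at a time.
--     result = [0] * len(matrix)
--     for j in range(len(vector)):
--         vj = vector[j]
--         result = [r + row[j] * vj for r, row in zip(result, matrix)]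
--     return result
-- ===== Notes on version B (the rewrite author's own statement) =====
-- stated objective: alternative
-- what changed: Row-by-row dot products replaced by a column-oriented accumulation: the whole result vector is maintained at once and updated per vector component (loop interchange, zip-based vectorized update).
import Mathlib
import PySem

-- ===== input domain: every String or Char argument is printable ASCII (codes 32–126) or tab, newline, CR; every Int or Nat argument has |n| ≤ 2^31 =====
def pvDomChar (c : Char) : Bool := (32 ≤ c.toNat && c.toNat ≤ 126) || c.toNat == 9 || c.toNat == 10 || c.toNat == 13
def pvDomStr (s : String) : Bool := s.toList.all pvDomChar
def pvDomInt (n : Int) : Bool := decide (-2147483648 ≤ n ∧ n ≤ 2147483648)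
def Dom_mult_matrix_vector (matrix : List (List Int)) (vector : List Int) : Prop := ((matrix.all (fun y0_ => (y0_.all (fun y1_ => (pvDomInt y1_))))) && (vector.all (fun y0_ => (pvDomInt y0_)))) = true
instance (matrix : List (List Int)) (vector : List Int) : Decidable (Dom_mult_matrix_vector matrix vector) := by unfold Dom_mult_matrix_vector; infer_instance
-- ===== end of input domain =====

-- B maintains the whole result vector and accumulates column by column (loop interchange)
-- instead of A's independent row dot products; same cost, different decomposition.

-- ===== PORT A =====
-- inner loop: for i in range(len(vector)): row_result += row[i] * vector[i]
def pvRowDot (row : List Int) (vector : List Int) : Int :=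
  (PySem.List.pyRange 0 (vector.length : Int) 1).foldl
    (fun row_result i => row_result + (PySem.List.pyGetD row i 0) * (PySem.List.pyGetD vector i 0)) 0

def mult_matrix_vector (matrix : List (List Int)) (vector : List Int) : List Int :=
  matrix.foldl (fun result row => result ++ [pvRowDot row vector]) []

-- ===== PORT B =====
-- one column step: result = [r + row[j] * vj for r, row in zip(result, matrix)]
def pvColStep (matrix : List (List Int)) (vj : Int) (j : Int) (result : List Int) : List Int :=
  List.zipWith (fun r row => r + (PySem.List.pyGetD row j 0) * vj) result matrix

def mult_matrix_vector_alt (matrix : List (List Int)) (vector : List Int) : List Int :=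
  (PySem.List.pyRange 0 (vector.length : Int) 1).foldl
    (fun result j => pvColStep matrix (PySem.List.pyGetD vector j 0) j result)
    (List.replicate matrix.length 0)

-- ===== PRECONDITION & SPEC =====
-- Pre_ excludes exactly the inputs where the Python A raises IndexError: a row shorter than the vector.
def Pre_mult_matrix_vector (matrix : List (List Int)) (vector : List Int) : Prop :=
  ∀ row ∈ matrix, vector.length ≤ row.length
instance (matrix : List (List Int)) (vector : List Int) : Decidable (Pre_mult_matrix_vector matrix vector) := by unfold Pre_mult_matrix_vector; infer_instance

def pvWitness_mult_matrix_vector : List (List Int) × List Int := ([[1, 2], [3, 4]], [5, 6])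

def Spec_mult_matrix_vector (matrix : List (List Int)) (vector : List Int) (out : List Int) : Prop := out = mult_matrix_vector_alt matrix vector
instance (matrix : List (List Int)) (vector : List Int) (out : List Int) : Decidable (Spec_mult_matrix_vector matrix vector out) := by unfold Spec_mult_matrix_vector; infer_instance

-- ===== CLAIM (what is proved, stated in full; the proofs are below) =====
def Claim_equal_mult_matrix_vector : Prop := ∀ (matrix : List (List Int)) (vector : List Int), Dom_mult_matrix_vector matrix vector → Pre_mult_matrix_vector matrix vector → Spec_mult_matrix_vector matrix vector (mult_matrix_vector matrix vector)

-- ===== LEMMAS AND PROOFS =====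

-- A's output accumulator: foldl-append is a map
theorem pv_foldl_append_map (l : List (List Int)) (v : List Int) (init : List Int) :
    l.foldl (fun result row => result ++ [pvRowDot row v]) init = init ++ l.map (fun row => pvRowDot row v) := by
  induction l generalizing init with
  | nil => simp
  | cons r t ih => simp [List.foldl_cons, ih]

-- partial dot product over the first k vector components
def pvDotK (row vector : List Int) (k : Nat) : Int :=
  (PySem.List.pyRange 0 (k : Int) 1).foldl
    (fun row_result i => row_result + (PySem.List.pyGetD row i 0) * (PySem.List.pyGetD vector i 0)) 0

theorem pvDotK_succ (row vector : List Int) (k : Nat) :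
    pvDotK row vector (k + 1)
      = pvDotK row vector k + (PySem.List.pyGetD row (k : Int) 0) * (PySem.List.pyGetD vector (k : Int) 0) := by
  unfold pvDotK
  rw [show ((k + 1 : Nat) : Int) = (k : Int) + 1 by push_cast; ring,
      PySem.List.pyRange_one_succ_right (Int.natCast_nonneg k)]
  simp [List.foldl_append]

theorem pv_zipWith_self {α β : Type} (f : α → α → β) (l : List α) :
    List.zipWith f l l = l.map (fun a => f a a) := by
  induction l with
  | nil => rfl
  | cons x t ih => simp [List.zipWith]

-- invariant: after the first k column steps, B holds the per-row partial dot products up to k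
theorem pv_colsteps_eq_map (matrix : List (List Int)) (vector : List Int) (k : Nat) :
    (PySem.List.pyRange 0 (k : Int) 1).foldl
        (fun result j => pvColStep matrix (PySem.List.pyGetD vector j 0) j result)
        (List.replicate matrix.length 0)
      = matrix.map (fun row => pvDotK row vector k) := by
  induction k with
  | zero =>
    simp [pvDotK, ← List.map_const']
  | succ k ih =>
    rw [show ((k + 1 : Nat) : Int) = (k : Int) + 1 by push_cast; ring,
        PySem.List.pyRange_one_succ_right (Int.natCast_nonneg k),
        List.foldl_append, ih]
    simp only [List.foldl_cons, List.foldl_nil, pvColStep, List.zipWith_map_left,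
      pv_zipWith_self, pvDotK_succ]

-- ===== VERDICT (by name: the statement is the Claim_ definition above) =====
theorem mult_matrix_vector_spec : Claim_equal_mult_matrix_vector := by
  intro matrix vector _ _
  unfold Spec_mult_matrix_vector mult_matrix_vector mult_matrix_vector_alt
  rw [pv_foldl_append_map, pv_colsteps_eq_map]
  simp [pvRowDot, pvDotK]
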